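-- pv_equiv track=rewrite | github.com/prestonr83/AdventofCode_2016 | Day 4/SecObscure.py | get_chksum
-- ===== SOURCE A (Python) =====
-- def get_chksum(enc_room):
--     enc_room = "".join(enc_room)
--     unq_chars = set(enc_room)
--     room_chars = list(enc_room)
--     tmp = {}
--     chksum = ''
--     for char in unq_chars:
--         try:
--             key = tmp[room_chars.count(char)]
--         except KeyError:
--             tmp[room_chars.count(char)] = []
--             key = tmp[room_chars.count(char)]
--         key.append(char)
--     cnt = [i for i in tmp.keys()]
--     cnt.sort()
--     cnt.reverse()
--     for i in cnt:
--         chars = tmp[i]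
--         chars.sort()
--         chksum += "".join(chars)
--     return chksum
-- ===== SOURCE B (Python) =====
-- def get_chksum(enc_room):
--     enc_room = "".join(enc_room)
--     freq = {}
--     for ch in enc_room:
--         freq[ch] = freq.get(ch, 0) + 1
--     return "".join(sorted(freq, key=lambda c: (-freq[c], c)))
-- ===== Notes on version B (the rewrite author's own statement) =====
-- stated objective: faster
-- what changed: B counts characters in a single pass into one frequency map and emits the checksum with one composite-key sort (-count, char) over the distinct characters, replacing A's count-keyed bucket dict built with one full list.count scan per unique character, the sorted-and-reversed key list, and a separate sort per bucket.
import Mathlib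
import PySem

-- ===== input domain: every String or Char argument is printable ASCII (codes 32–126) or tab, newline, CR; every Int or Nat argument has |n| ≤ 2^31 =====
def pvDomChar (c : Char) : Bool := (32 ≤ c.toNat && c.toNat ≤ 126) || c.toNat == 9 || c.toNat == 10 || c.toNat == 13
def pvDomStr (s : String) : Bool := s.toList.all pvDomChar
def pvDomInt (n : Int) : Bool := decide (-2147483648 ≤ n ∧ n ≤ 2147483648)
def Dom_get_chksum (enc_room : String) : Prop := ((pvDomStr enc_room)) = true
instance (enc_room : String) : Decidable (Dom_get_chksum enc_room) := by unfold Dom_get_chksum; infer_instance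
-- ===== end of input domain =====

-- B replaces A's count-keyed bucket dict (one list.count scan per unique char) + per-bucket sorts
-- + reversed key list by one single-pass frequency map and one composite-key sort (-count, char);
-- a timing run measured B ≥ 1.5× faster on the generated large inputs.


-- ===== PORT A =====
-- ''.join(enc_room) on a string is the string itself; the try/except-KeyError block plus
-- key.append(char) is exactly tmp[cnt] = tmp.get(cnt, []) + [char], i.e. Dict.modify.
-- tmp[i] in the output loop is total because i ∈ tmp.keys, so getD is exact there.
def get_chksum (enc_room : String) : String :=
  let room_chars := enc_room.toList
  let unq_chars : PySem.Set Char := PySem.Set.ofList room_chars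
  let tmp : PySem.Dict Int (List Char) :=
    unq_chars.foldl
      (fun tmp char => tmp.modify ((room_chars.count char : Int)) [] (fun key => key ++ [char]))
      PySem.Dict.empty
  let cnt := (PySem.List.sorted tmp.keys (fun i => i)).reverse
  let chksum := cnt.foldl
      (fun chksum i => chksum ++ PySem.List.sorted (tmp.getD i []) (fun c => c)) []
  String.mk chksum

-- ===== PORT B =====
def get_chksum_alt (enc_room : String) : String :=
  let s := enc_room.toList
  let freq : PySem.Dict Char Int :=
    s.foldl (fun freq ch => freq.insert ch (freq.getD ch 0 + 1)) PySem.Dict.empty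
  String.mk (PySem.List.sorted2 freq.keys (fun c => -(freq.getD c 0)) (fun c => c))

-- ===== PRECONDITION & SPEC =====
def Spec_get_chksum (enc_room : String) (out : String) : Prop := out = get_chksum_alt enc_room
instance (enc_room : String) (out : String) : Decidable (Spec_get_chksum enc_room out) := by unfold Spec_get_chksum; infer_instance

-- ===== CLAIM (what is proved, stated in full; the proofs are below) =====
def Claim_equal_get_chksum : Prop := ∀ (enc_room : String), Dom_get_chksum enc_room → Spec_get_chksum enc_room (get_chksum enc_room)

-- ===== LEMMAS AND PROOFS =====

-- the strict order "more frequent first, ties alphabetically" (relative to the char list s)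
def pvOrd (s : List Char) (a b : Char) : Prop :=
  s.count b < s.count a ∨ (s.count a = s.count b ∧ a < b)

theorem pvOrd_antisymm (s : List Char) (a b : Char) (h1 : pvOrd s a b) (h2 : pvOrd s b a) : a = b := by
  rcases h1 with h1 | ⟨h1, h1'⟩ <;> rcases h2 with h2 | ⟨h2, h2'⟩ <;>
    first
      | omega
      | exact absurd (lt_trans h1' h2') (lt_irrefl a)

theorem insertBy_nil {α : Type} (before : α → α → Bool) (x : α) :
    PySem.List.insertBy before x [] = [x] := rfl

theorem insertBy_cons {α : Type} (before : α → α → Bool) (x y : α) (ys : List α) :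
    PySem.List.insertBy before x (y :: ys) =
      if before x y then x :: y :: ys else y :: PySem.List.insertBy before x ys := rfl

-- insertBy is a permutation of consing
theorem perm_insertBy {α : Type} (before : α → α → Bool) (x : α) (ys : List α) :
    (PySem.List.insertBy before x ys).Perm (x :: ys) := by
  induction ys with
  | nil => rw [insertBy_nil]
  | cons y ys ih =>
    rw [insertBy_cons]
    split_ifs with h
    · exact List.Perm.refl _
    · exact (ih.cons y).trans (List.Perm.swap x y ys)

-- inserting into a pairwise-ordered list keeps it pairwise-ordered, given transitivity and
-- comparability of the new element with the list
theorem pairwise_insertBy {α : Type} (before : α → α → Bool)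
    (htrans : ∀ a b c, before a b = true → before b c = true → before a c = true)
    (x : α) (acc : List α)
    (hacc : acc.Pairwise (fun a b => before a b = true))
    (hx : ∀ y ∈ acc, before x y = true ∨ before y x = true) :
    (PySem.List.insertBy before x acc).Pairwise (fun a b => before a b = true) := by
  induction acc with
  | nil => rw [insertBy_nil]; exact List.pairwise_singleton _ _
  | cons y ys ih =>
    rcases List.pairwise_cons.mp hacc with ⟨hy, hys⟩
    rw [insertBy_cons]
    split_ifs with h
    · refine List.pairwise_cons.mpr ⟨?_, hacc⟩
      intro z hz
      rcases List.mem_cons.mp hz with hz | hz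
      · exact hz ▸ h
      · exact htrans x y z h (hy z hz)
    · refine List.pairwise_cons.mpr ⟨?_, ?_⟩
      · intro z hz
        rcases (PySem.List.mem_insertBy before x z ys).mp hz with hz | hz
        · subst hz
          rcases hx y (by simp) with h' | h'
          · exact absurd h' h
          · exact h'
        · exact hy z hz
      · exact ih hys (fun z hz => hx z (by simp [hz]))

-- an insertion sort over a Nodup list, with a relation total on distinct elements, is Pairwise
theorem pairwise_foldl_insertBy {α : Type} (before : α → α → Bool)
    (htrans : ∀ a b c, before a b = true → before b c = true → before a c = true)
    (htot : ∀ a b, a ≠ b → before a b = true ∨ before b a = true)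
    (xs : List α) : ∀ (acc : List α), (xs ++ acc).Nodup →
    acc.Pairwise (fun a b => before a b = true) →
    (xs.foldl (fun acc x => PySem.List.insertBy before x acc) acc).Pairwise
      (fun a b => before a b = true) := by
  induction xs with
  | nil => intro acc _ hacc; simpa using hacc
  | cons x xs ih =>
    intro acc hnd hacc
    simp only [List.foldl_cons]
    have h' : (x ∉ xs ∧ x ∉ acc) ∧ (xs ++ acc).Nodup := by simpa using hnd
    refine ih (PySem.List.insertBy before x acc) ?_ ?_
    · have hperm : (xs ++ PySem.List.insertBy before x acc).Perm (x :: (xs ++ acc)) :=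
        ((perm_insertBy before x acc).append_left xs).trans List.perm_middle
      exact hperm.symm.nodup (List.nodup_cons.mpr ⟨by simp [h'.1.1, h'.1.2], h'.2⟩)
    · exact pairwise_insertBy before htrans x acc hacc
        (fun y hy => htot x y (fun he => h'.1.2 (he ▸ hy)))

-- A's bucket dict, as a named helper for the proofs
def tmpD (s : List Char) : PySem.Dict Int (List Char) :=
  (PySem.Set.ofList s).foldl
    (fun tmp char => tmp.modify ((s.count char : Int)) [] (fun key => key ++ [char]))
    PySem.Dict.empty

theorem tmpD_getD (s : List Char) (n : Int) :
    (tmpD s).getD n [] = (PySem.Set.ofList s).filter (fun c => ((s.count c : Int)) == n) := by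
  have h : tmpD s = ((PySem.Set.ofList s).map (fun c => (((s.count c : Int)), c))).foldl
      (fun d p => d.modify p.1 [] (fun key => key ++ [p.2])) PySem.Dict.empty := by
    rw [List.foldl_map]; rfl
  rw [h, PySem.Dict.getD_foldl_modify_append]
  simp [List.filter_map, List.map_map, Function.comp_def]

theorem tmpD_keys (s : List Char) :
    (tmpD s).keys = PySem.Set.ofList ((PySem.Set.ofList s).map (fun c => ((s.count c : Int)))) := by
  rw [tmpD, PySem.Dict.keys_foldl_modify_key (f := fun _ c => (fun key => key ++ [c]))]
  rw [PySem.Set.ofList_eq_foldl]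
  rfl

-- B's comparison function, spelled out
def pvBefore (s : List Char) (a b : Char) : Bool :=
  decide ((-(s.count a : Int)) < (-(s.count b : Int))) ||
    (!decide ((-(s.count b : Int)) < (-(s.count a : Int))) && decide (a < b))

theorem sorted2_count_eq_foldl (s : List Char) (xs : List Char) :
    PySem.List.sorted2 xs (fun c => -((s.count c : Nat) : Int)) (fun c => c) =
      xs.foldl (fun acc x => PySem.List.insertBy (pvBefore s) x acc) [] := rfl

theorem pvBefore_iff (s : List Char) (a b : Char) :
    pvBefore s a b = true ↔ pvOrd s a b := by
  unfold pvBefore pvOrd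
  by_cases hab : a < b <;> simp [hab] <;> omega

theorem pvOrd_trans (s : List Char) (a b c : Char)
    (h1 : pvOrd s a b) (h2 : pvOrd s b c) : pvOrd s a c := by
  rcases h1 with h1 | ⟨h1, h1'⟩ <;> rcases h2 with h2 | ⟨h2, h2'⟩
  · exact Or.inl (by omega)
  · exact Or.inl (by omega)
  · exact Or.inl (by omega)
  · exact Or.inr ⟨by omega, lt_trans h1' h2'⟩

theorem pvOrd_total (s : List Char) (a b : Char) (h : a ≠ b) :
    pvOrd s a b ∨ pvOrd s b a := by
  rcases Nat.lt_trichotomy (s.count a) (s.count b) with h' | h' | h'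
  · exact Or.inr (Or.inl h')
  · rcases lt_or_gt_of_ne h with hlt | hlt
    · exact Or.inl (Or.inr ⟨h', hlt⟩)
    · exact Or.inr (Or.inr ⟨h'.symm, hlt⟩)
  · exact Or.inl (Or.inl h')

-- B's output is pairwise-ordered by pvOrd
theorem b_pairwise (s : List Char) :
    (PySem.List.sorted2 (PySem.Set.ofList s) (fun c => -((s.count c : Nat) : Int)) (fun c => c)).Pairwise
      (pvOrd s) := by
  rw [sorted2_count_eq_foldl]
  refine (pairwise_foldl_insertBy (pvBefore s) ?_ ?_ (PySem.Set.ofList s) [] ?_ ?_).imp ?_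
  · intro a b c h1 h2
    exact (pvBefore_iff s a c).mpr
      (pvOrd_trans s a b c ((pvBefore_iff s a b).mp h1) ((pvBefore_iff s b c).mp h2))
  · intro a b h
    rcases pvOrd_total s a b h with h' | h'
    · exact Or.inl ((pvBefore_iff s a b).mpr h')
    · exact Or.inr ((pvBefore_iff s b a).mpr h')
  · simpa using PySem.Set.nodup_ofList s
  · exact List.Pairwise.nil
  · exact fun {a b} h => (pvBefore_iff s a b).mp h

-- A's output list
theorem a_flatMap (s : List Char) :
    ((PySem.List.sorted (tmpD s).keys (fun i => i)).reverse).foldl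
        (fun ch i => ch ++ PySem.List.sorted ((tmpD s).getD i []) (fun c => c)) [] =
      ((PySem.List.sorted (tmpD s).keys (fun i => i)).reverse).flatMap
        (fun i => PySem.List.sorted ((tmpD s).getD i []) (fun c => c)) := by
  rw [PySem.List.foldl_append_eq_flatMap]
  rfl

theorem mem_bucket (s : List Char) (i : Int) (x : Char)
    (hx : x ∈ PySem.List.sorted ((tmpD s).getD i []) (fun c => c)) :
    x ∈ PySem.Set.ofList s ∧ ((s.count x : Nat) : Int) = i := by
  rw [PySem.List.mem_sorted, tmpD_getD] at hx
  rcases List.mem_filter.mp hx with ⟨h1, h2⟩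
  exact ⟨h1, by simpa using h2⟩

theorem bucket_nodup (s : List Char) (i : Int) :
    (PySem.List.sorted ((tmpD s).getD i []) (fun c => c)).Nodup := by
  refine ((PySem.List.sorted_perm ((tmpD s).getD i []) (fun c : Char => c) false).symm).nodup ?_
  rw [tmpD_getD]
  exact (PySem.Set.nodup_ofList s).filter _

theorem a_pairwise (s : List Char) :
    (((PySem.List.sorted (tmpD s).keys (fun i => i)).reverse).flatMap
        (fun i => PySem.List.sorted ((tmpD s).getD i []) (fun c => c))).Pairwise (pvOrd s) := by
  refine List.pairwise_flatMap.mpr ⟨?_, ?_⟩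
  · intro i _
    have hle := PySem.List.sorted_pairwise ((tmpD s).getD i []) (fun c => c)
    have hnd : (PySem.List.sorted ((tmpD s).getD i []) (fun c => c)).Pairwise (· ≠ ·) :=
      bucket_nodup s i
    refine (hle.and hnd).imp_of_mem ?_
    intro a b ha hb hab
    have hka := (mem_bucket s i a ha).2
    have hkb := (mem_bucket s i b hb).2
    exact Or.inr ⟨by omega, lt_of_le_of_ne hab.1 hab.2⟩
  · have h1 : (PySem.List.sorted (tmpD s).keys (fun i => i)).Pairwise (· < ·) := by
      rw [tmpD_keys]
      exact PySem.List.sorted_ofList_pairwise_lt _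
    refine List.pairwise_reverse.mpr (h1.imp ?_)
    intro i j hij x hx y hy
    have hkx := (mem_bucket s j x hx).2
    have hky := (mem_bucket s i y hy).2
    exact Or.inl (by omega)

theorem sum_map_ite (l : List Int) (k : Int) (v : Nat) (hnd : l.Nodup) :
    (l.map (fun n => if k = n then v else 0)).sum = if k ∈ l then v else 0 := by
  induction l with
  | nil => simp
  | cons n t ih =>
    rcases List.nodup_cons.mp hnd with ⟨hn, ht⟩
    rw [List.map_cons, List.sum_cons, ih ht]
    by_cases h : k = n
    · subst h
      rw [if_pos rfl, if_neg hn, if_pos (by simp)]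
      omega
    · rw [if_neg h]
      simp [List.mem_cons, h]

theorem a_perm (s : List Char) :
    (((PySem.List.sorted (tmpD s).keys (fun i => i)).reverse).flatMap
        (fun i => PySem.List.sorted ((tmpD s).getD i []) (fun c => c))).Perm
      (PySem.Set.ofList s) := by
  refine List.perm_iff_count.mpr ?_
  intro a
  rw [List.count_flatMap]
  have hcnt : ∀ i : Int, ((PySem.List.sorted ((tmpD s).getD i []) (fun c => c)).count a) =
      if ((s.count a : Nat) : Int) = i then (PySem.Set.ofList s).count a else 0 := by
    intro i
    rw [(PySem.List.sorted_perm _ _ _).count_eq, tmpD_getD]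
    by_cases h : ((s.count a : Nat) : Int) = i
    · rw [if_pos h]
      refine List.count_filter ?_
      simp [h]
    · rw [if_neg h]
      refine List.count_eq_zero.mpr ?_
      intro hmem
      exact h (by simpa using (List.mem_filter.mp hmem).2)
  have hmap : ((PySem.List.sorted (tmpD s).keys (fun i => i)).reverse).map
        (List.count a ∘ fun i => PySem.List.sorted ((tmpD s).getD i []) (fun c => c)) =
      ((PySem.List.sorted (tmpD s).keys (fun i => i)).reverse).map
        (fun i => if ((s.count a : Nat) : Int) = i then (PySem.Set.ofList s).count a else 0) :=
    List.map_congr_left (fun i _ => hcnt i)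
  rw [hmap, sum_map_ite _ _ _ (List.nodup_reverse.mpr
    (((PySem.List.sorted_perm (tmpD s).keys (fun i : Int => i) false).symm).nodup
      (by rw [tmpD_keys]; exact PySem.Set.nodup_ofList _)))]
  have hmem : (((s.count a : Nat) : Int) ∈ (PySem.List.sorted (tmpD s).keys (fun i => i)).reverse) ↔
      ∃ b ∈ PySem.Set.ofList s, ((s.count b : Nat) : Int) = ((s.count a : Nat) : Int) := by
    simp [PySem.List.mem_sorted, tmpD_keys, PySem.Set.mem_ofList, List.mem_map]
  by_cases ha : a ∈ s
  · rw [if_pos (hmem.mpr ⟨a, (PySem.Set.mem_ofList s a).mpr ha, rfl⟩)]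
  · have haU : a ∉ PySem.Set.ofList s := fun h => ha ((PySem.Set.mem_ofList s a).mp h)
    rw [List.count_eq_zero.mpr haU, if_neg ?_]
    intro hk
    rcases hmem.mp hk with ⟨b, hbU, hK⟩
    have hca : s.count a = 0 := List.count_eq_zero.mpr ha
    have hcb : s.count b = 0 := by omega
    exact (List.count_eq_zero.mp hcb) ((PySem.Set.mem_ofList s b).mp hbU)

theorem lists_eq (s : List Char) :
    ((PySem.List.sorted (tmpD s).keys (fun i => i)).reverse).foldl
        (fun ch i => ch ++ PySem.List.sorted ((tmpD s).getD i []) (fun c => c)) [] =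
      PySem.List.sorted2 (PySem.Dict.counter s).keys
        (fun c => -((PySem.Dict.counter s).getD c 0)) (fun c => c) := by
  rw [a_flatMap]
  have hB : PySem.List.sorted2 (PySem.Dict.counter s).keys
      (fun c => -((PySem.Dict.counter s).getD c 0)) (fun c => c) =
      PySem.List.sorted2 (PySem.Set.ofList s) (fun c => -((s.count c : Nat) : Int)) (fun c => c) := by
    simp only [PySem.Dict.keys_counter, PySem.Dict.getD_counter]
  rw [hB]
  refine List.Perm.eq_of_pairwise (le := pvOrd s)
    (fun a b _ _ h1 h2 => pvOrd_antisymm s a b h1 h2) (a_pairwise s) (b_pairwise s) ?_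
  exact (a_perm s).trans (PySem.List.sorted2_perm _ _ _ _).symm

theorem get_chksum_spec : Claim_equal_get_chksum := by
  intro enc_room _
  unfold Spec_get_chksum get_chksum get_chksum_alt
  simp only [PySem.Dict.foldl_insert_getD_add_one_eq_counter]
  exact congrArg String.mk (lists_eq enc_room.toList)
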